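-- pv_equiv track=rewrite | github.com/bibleman-stan/readers-gnt | scripts/scan_m1_reverse_drift.py | word_positions
-- ===== SOURCE A (Python) =====
-- def word_positions(text):
--     out, i, n = [], 0, len(text)
--     while i < n:
--         while i < n and text[i].isspace(): i += 1
--         if i >= n: break
--         s = i
--         while i < n and not text[i].isspace(): i += 1
--         out.append((text[s:i], s, i))
--     return out
-- ===== SOURCE B (Python) =====
-- def word_positions(text):
--     out = []
--     buf = []
--     start = 0
--     pos = 0
--     for ch in text:
--         if ch.isspace():
--             if buf:
--                 out.append((''.join(buf), start, pos))
--                 buf = []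
--         else:
--             if not buf:
--                 start = pos
--             buf.append(ch)
--         pos += 1
--     if buf:
--         out.append((''.join(buf), start, pos))
--     return out
-- ===== Notes on version B (the rewrite author's own statement) =====
-- stated objective: alternative
-- what changed: Replaces A's nested index-based while loops (skip whitespace / scan word, then slice text[s:i]) with a single for-loop over the characters that accumulates the current word in a buffer and emits it on whitespace transitions, flushing a pending word at the end.
import Mathlib
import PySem

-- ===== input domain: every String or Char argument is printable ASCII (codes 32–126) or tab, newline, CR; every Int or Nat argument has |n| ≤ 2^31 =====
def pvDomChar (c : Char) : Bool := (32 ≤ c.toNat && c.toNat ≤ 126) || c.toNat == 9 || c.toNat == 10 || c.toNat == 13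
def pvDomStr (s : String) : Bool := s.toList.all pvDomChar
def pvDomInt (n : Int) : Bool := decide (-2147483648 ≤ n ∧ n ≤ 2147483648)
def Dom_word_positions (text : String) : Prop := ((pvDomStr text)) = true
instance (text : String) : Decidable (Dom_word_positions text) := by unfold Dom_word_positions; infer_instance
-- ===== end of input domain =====

-- B replaces A's nested index-based while loops with one pass over the characters,
-- buffering the current word and emitting it on whitespace transitions (alternative, same cost).

-- ===== PORT A =====
-- A works on string indices; the port works on text.toList with Nat indices, which is exact
-- here because every index A uses satisfies 0 ≤ i ≤ len(text) (i only grows from 0).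

-- inner 'while i < n and text[i].isspace(): i += 1'
def pvSkipWS (l : List Char) (i : Nat) : Nat :=
  if h : i < l.length then
    if PySem.Chars.isspace l[i] then pvSkipWS l (i + 1) else i
  else i
termination_by l.length - i
decreasing_by omega

-- inner 'while i < n and not text[i].isspace(): i += 1'
def pvSkipWord (l : List Char) (i : Nat) : Nat :=
  if h : i < l.length then
    if ¬ PySem.Chars.isspace l[i] then pvSkipWord l (i + 1) else i
  else i
termination_by l.length - i
decreasing_by omega

-- facts the outer loop's termination needs
theorem pvSkipWS_ge (l : List Char) (i : Nat) : i ≤ pvSkipWS l i := by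
  fun_induction pvSkipWS l i with
  | case1 i h hsp ih => omega
  | case2 i h hsp => exact le_refl _
  | case3 i h => exact le_refl _

theorem pvSkipWord_ge (l : List Char) (i : Nat) : i ≤ pvSkipWord l i := by
  fun_induction pvSkipWord l i with
  | case1 i h hsp ih => omega
  | case2 i h hsp => exact le_refl _
  | case3 i h => exact le_refl _

theorem pvSkipWord_gt (l : List Char) (i : Nat) (h : i < l.length)
    (hsp : ¬ PySem.Chars.isspace l[i]) : i < pvSkipWord l i := by
  rw [pvSkipWord]
  simp only [h, dif_pos, hsp]
  exact Nat.lt_of_lt_of_le (Nat.lt_succ_self i) (pvSkipWord_ge l (i + 1))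

theorem pvSkipWS_stop (l : List Char) (i : Nat) (h : pvSkipWS l i < l.length) :
    ¬ PySem.Chars.isspace l[pvSkipWS l i] := by
  fun_induction pvSkipWS l i with
  | case1 j hj hsp ih => exact ih h
  | case2 j hj hsp => simpa using hsp
  | case3 j hj => omega

-- outer 'while i < n: …'
def pvLoopA (l : List Char) (i : Nat) : List (String × Int × Int) :=
  if hi : i < l.length then
    let j := pvSkipWS l i
    if hj : j < l.length then
      let k := pvSkipWord l j
      (String.ofList ((l.drop j).take (k - j)), (j : Int), (k : Int)) :: pvLoopA l k
    else []          -- 'if i >= n: break'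
  else []
termination_by l.length - i
decreasing_by
  have h1 : i ≤ pvSkipWS l i := pvSkipWS_ge l i
  have h2 : pvSkipWS l i < pvSkipWord l (pvSkipWS l i) :=
    pvSkipWord_gt l _ hj (pvSkipWS_stop l i hj)
  omega

def word_positions (text : String) : List (String × Int × Int) :=
  pvLoopA text.toList 0

-- ===== PORT B =====
-- one step of B's for-loop; state = (out, buf, start, pos)
def pvStepB (st : List (String × Int × Int) × List Char × Nat × Nat) (ch : Char) :
    List (String × Int × Int) × List Char × Nat × Nat :=
  let (out, buf, start, pos) := st
  if PySem.Chars.isspace ch then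
    if buf ≠ [] then (out ++ [(String.ofList buf, (start : Int), (pos : Int))], [], start, pos + 1)
    else (out, buf, start, pos + 1)
  else
    let start' := if buf = [] then pos else start
    (out, buf ++ [ch], start', pos + 1)

def word_positions_alt (text : String) : List (String × Int × Int) :=
  let st := text.toList.foldl pvStepB ([], [], 0, 0)
  match st with
  | (out, buf, start, pos) =>
    if buf ≠ [] then out ++ [(String.ofList buf, (start : Int), (pos : Int))] else out

-- ===== PRECONDITION & SPEC =====
def Spec_word_positions (text : String) (out : List (String × Int × Int)) : Prop := out = word_positions_alt text
instance (text : String) (out : List (String × Int × Int)) : Decidable (Spec_word_positions text out) := by unfold Spec_word_positions; infer_instance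

-- ===== CLAIM (what is proved, stated in full; the proofs are below) =====
def Claim_equal_word_positions : Prop := ∀ (text : String), Dom_word_positions text → Spec_word_positions text (word_positions text)

-- ===== LEMMAS AND PROOFS =====

-- canonical tokenizer both ports are reduced to
def pvCanon : List Char → Nat → List (String × Int × Int)
  | [], _ => []
  | c :: cs, i =>
    if PySem.Chars.isspace c then pvCanon cs (i + 1)
    else
      let w := (c :: cs).takeWhile (fun d => !(PySem.Chars.isspace d))
      (String.ofList w, (i : Int), ((i + w.length : Nat) : Int)) ::
        pvCanon ((c :: cs).dropWhile (fun d => !(PySem.Chars.isspace d))) (i + w.length)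
termination_by l _ => l.length
decreasing_by
  · simp
  · rename_i hsp
    have := List.length_dropWhile_le (fun d => !(PySem.Chars.isspace d)) cs
    simp_all


-- ---- A-side: characterize the two inner while loops ----
theorem pvSkipWS_eq (l : List Char) (i : Nat) :
    pvSkipWS l i = i + ((l.drop i).takeWhile (fun d => PySem.Chars.isspace d)).length := by
  fun_induction pvSkipWS l i with
  | case1 j h hsp ih =>
      rw [List.drop_eq_getElem_cons h, List.takeWhile_cons]
      simp only [hsp, if_true, List.length_cons]
      omega
  | case2 j h hsp =>
      rw [List.drop_eq_getElem_cons h, List.takeWhile_cons]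
      simp only [hsp]
      simp
  | case3 j h =>
      rw [List.drop_eq_nil_of_le (by omega)]
      simp

theorem pvSkipWord_eq (l : List Char) (i : Nat) :
    pvSkipWord l i = i + ((l.drop i).takeWhile (fun d => !(PySem.Chars.isspace d))).length := by
  fun_induction pvSkipWord l i with
  | case1 j h hsp ih =>
      rw [List.drop_eq_getElem_cons h, List.takeWhile_cons]
      simp only [Bool.not_eq_true] at hsp
      simp only [hsp, Bool.not_false, if_true, List.length_cons]
      omega
  | case2 j h hsp =>
      rw [List.drop_eq_getElem_cons h, List.takeWhile_cons]
      simp only [not_not] at hsp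
      simp only [hsp, Bool.not_true]
      simp
  | case3 j h =>
      rw [List.drop_eq_nil_of_le (by omega)]
      simp

theorem pvDropLenTakeWhile (p : Char → Bool) (m : List Char) :
    m.drop (m.takeWhile p).length = m.dropWhile p := by
  induction m with
  | nil => simp
  | cons c cs ih =>
      by_cases h : p c
      · simp [h, ih]
      · simp [h]

theorem pvTakeLenTakeWhile (p : Char → Bool) (m : List Char) :
    m.take (m.takeWhile p).length = m.takeWhile p := by
  induction m with
  | nil => simp
  | cons c cs ih =>
      by_cases h : p c
      · simp [h, ih]
      · simp [h]

theorem pvDropAdd (l : List Char) (i t : Nat) : l.drop (i + t) = (l.drop i).drop t := by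
  rw [List.drop_drop, Nat.add_comm]

theorem drop_skipWS (l : List Char) (i : Nat) :
    l.drop (pvSkipWS l i) = (l.drop i).dropWhile (fun d => PySem.Chars.isspace d) := by
  rw [pvSkipWS_eq, pvDropAdd, pvDropLenTakeWhile]

theorem drop_skipWord (l : List Char) (i : Nat) :
    l.drop (pvSkipWord l i) = (l.drop i).dropWhile (fun d => !(PySem.Chars.isspace d)) := by
  rw [pvSkipWord_eq, pvDropAdd, pvDropLenTakeWhile]

theorem take_skipWord (l : List Char) (i : Nat) :
    (l.drop i).take (pvSkipWord l i - i) = (l.drop i).takeWhile (fun d => !(PySem.Chars.isspace d)) := by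
  rw [pvSkipWord_eq, Nat.add_sub_cancel_left, pvTakeLenTakeWhile]

-- pvCanon consumes leading whitespace one char at a time
theorem pvCanon_spaces (ws : List Char) : ∀ (rest : List Char) (i : Nat),
    (∀ c ∈ ws, PySem.Chars.isspace c) →
    pvCanon (ws ++ rest) i = pvCanon rest (i + ws.length) := by
  induction ws with
  | nil => intro rest i _; simp
  | cons c cs ih =>
      intro rest i h
      have hc : PySem.Chars.isspace c := h c (by simp)
      rw [List.cons_append, pvCanon]
      simp only [hc, if_true]
      rw [ih rest (i + 1) (fun d hd => h d (by simp [hd]))]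
      congr 1
      simp
      omega

theorem pvCanon_skip (l : List Char) (i : Nat) :
    pvCanon (l.drop i) i = pvCanon (l.drop (pvSkipWS l i)) (pvSkipWS l i) := by
  conv_lhs => rw [← List.takeWhile_append_dropWhile (p := fun d => PySem.Chars.isspace d) (l := l.drop i)]
  rw [pvCanon_spaces _ _ _ (fun c hc => List.mem_takeWhile_imp hc), ← drop_skipWS, pvSkipWS_eq]

theorem pvLoopA_eq_canon (l : List Char) (i : Nat) :
    pvLoopA l i = pvCanon (l.drop i) i := by
  fun_induction pvLoopA l i with
  | case1 i hi j hj k ih =>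
      have hjdef : j = pvSkipWS l i := rfl
      have hkdef : k = pvSkipWord l j := rfl
      rw [pvCanon_skip, ← hjdef]
      have hdropj : l.drop j = l[j] :: l.drop (j + 1) := List.drop_eq_getElem_cons hj
      have hnsp : ¬ PySem.Chars.isspace l[j] := pvSkipWS_stop l i hj
      rw [hdropj, pvCanon]
      simp only [hnsp]
      rw [← hdropj]
      have hk : k = j + ((l.drop j).takeWhile (fun d => !(PySem.Chars.isspace d))).length :=
        hkdef.trans (pvSkipWord_eq l j)
      rw [ih]
      congr 2
      · rw [hkdef, take_skipWord]
      · simp [hk]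
      · rw [hkdef, drop_skipWord]
  | case2 i hi j hj =>
      have hjdef : j = pvSkipWS l i := rfl
      rw [pvCanon_skip, ← hjdef, List.drop_eq_nil_of_le (by omega), pvCanon]
  | case3 i hi =>
      rw [List.drop_eq_nil_of_le (by omega), pvCanon]

-- ---- B-side: the fold invariant ----
def pvFlush (st : List (String × Int × Int) × List Char × Nat × Nat) : List (String × Int × Int) :=
  match st with
  | (out, buf, start, pos) =>
    if buf ≠ [] then out ++ [(String.ofList buf, (start : Int), (pos : Int))] else out

theorem pvFoldB (l2 : List Char) : ∀ (out : List (String × Int × Int)) (buf : List Char) (start pos : Nat),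
    (buf = [] → pvFlush (l2.foldl pvStepB (out, buf, start, pos)) = out ++ pvCanon l2 pos) ∧
    (buf ≠ [] → pos = start + buf.length →
      pvFlush (l2.foldl pvStepB (out, buf, start, pos)) =
        out ++ (String.ofList (buf ++ l2.takeWhile (fun d => !(PySem.Chars.isspace d))), (start : Int),
                ((start + buf.length + (l2.takeWhile (fun d => !(PySem.Chars.isspace d))).length : Nat) : Int)) ::
          pvCanon (l2.dropWhile (fun d => !(PySem.Chars.isspace d)))
                  (pos + (l2.takeWhile (fun d => !(PySem.Chars.isspace d))).length)) := by
  induction l2 with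
  | nil =>
      intro out buf start pos
      constructor
      · intro hb; simp [hb, pvFlush, pvCanon]
      · intro hb hpos
        simp [pvFlush, hb, pvCanon, hpos]
  | cons c cs ih =>
      intro out buf start pos
      constructor
      · intro hb
        subst hb
        by_cases hsp : PySem.Chars.isspace c
        · rw [List.foldl_cons]
          have hstep : pvStepB (out, ([] : List Char), start, pos) c = (out, [], start, pos + 1) := by
            simp [pvStepB, hsp]
          rw [hstep, (ih out [] start (pos + 1)).1 rfl, pvCanon]
          simp [hsp]
        · rw [List.foldl_cons]
          have hstep : pvStepB (out, ([] : List Char), start, pos) c = (out, [c], pos, pos + 1) := by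
            simp [pvStepB, hsp]
          rw [hstep, (ih out [c] pos (pos + 1)).2 (by simp) (by simp)]
          rw [pvCanon]
          simp only [hsp]
          simp [hsp]
          exact ⟨by omega, by congr 1; omega⟩
      · intro hb hpos
        by_cases hsp : PySem.Chars.isspace c
        · rw [List.foldl_cons]
          have hstep : pvStepB (out, buf, start, pos) c
              = (out ++ [(String.ofList buf, (start : Int), (pos : Int))], [], start, pos + 1) := by
            simp [pvStepB, hsp, hb]
          rw [hstep, (ih _ [] start (pos + 1)).1 rfl]
          simp [hsp]
          rw [pvCanon]
          simp [hsp, hpos]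
        · rw [List.foldl_cons]
          have hstep : pvStepB (out, buf, start, pos) c = (out, buf ++ [c], start, pos + 1) := by
            simp [pvStepB, hsp, hb]
          rw [hstep, (ih out (buf ++ [c]) start (pos + 1)).2 (by simp) (by simp [hpos]; omega)]
          simp [hsp]
          exact ⟨by omega, by congr 1; omega⟩

-- ===== VERDICT (by name: the statement is the Claim_ definition above) =====
theorem word_positions_spec : Claim_equal_word_positions := by
  intro text _
  show word_positions text = word_positions_alt text
  have h := (pvFoldB text.toList [] [] 0 0).1 rfl
  simp only [List.nil_append] at h
  calc word_positions text = pvCanon text.toList 0 := by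
        unfold word_positions
        rw [pvLoopA_eq_canon]
        simp
    _ = word_positions_alt text := by
        rw [← h]
        rfl
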